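-- pv_equiv track=rewrite | github.com/qroam/web-document-discourse-parsing | visualization/structure_generator_new.py | dfp
-- ===== SOURCE A (Python) =====
-- def find_children(father_id_list, node_id, previous_list=None):
--     """
--     Find all the childen nodes of the input node `node_id`, given the `father_id_list` of the whole document
--     :params
--     father_id_list: List[int], father node id of each paragraph in the document
--     node_id: int, the node you want to find its children nodes
--     """
--     children_list = []
--     for node, father in enumerate(father_id_list):
--         if father == node_id:
--             children_list.append(node)
--     return children_list
--
-- def dfp(father_id_list, node_id=-1, depth=-1):
--     """
--     Depth First Search
--     """
--     structure_dict = {}  # to record the subtree rooted by node_id, in the format node_id : List[child_nodes]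
--     node_depth = {}  # to record the absolute depth (in the whole tree) of nodes in the subtree rooted by node_id
--     children_list = find_children(father_id_list, node_id)
--     structure_dict[node_id] = children_list
--     node_depth[node_id] = depth
--     for child_node in children_list:
--         structure_dict_of_child, node_depth_of_child = dfp(father_id_list, child_node, depth+1)
--         structure_dict.update(structure_dict_of_child)
--         node_depth.update(node_depth_of_child)
--     return structure_dict, node_depth
-- ===== SOURCE B (Python) =====
-- def dfp(father_id_list, node_id=-1, depth=-1):
--     # Build the children adjacency map once, then one DFS that
--     # threads the two shared result dicts through the traversal.
--     children = {}
--     for node, father in enumerate(father_id_list):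
--         children.setdefault(father, []).append(node)
--     structure_dict = {}
--     node_depth = {}
--     def visit(nid, d):
--         kids = children.get(nid, [])
--         structure_dict[nid] = kids
--         node_depth[nid] = d
--         for c in kids:
--             visit(c, d + 1)
--     visit(node_id, depth)
--     return structure_dict, node_depth
-- ===== Notes on version B (the rewrite author's own statement) =====
-- stated objective: alternative
-- what changed: B builds the father->children adjacency dict in one pass and then does a single DFS that threads the two shared result dicts through the recursion, instead of A's rescan of the whole list at every visited node and per-call dicts merged with dict.update.
import Mathlib
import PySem

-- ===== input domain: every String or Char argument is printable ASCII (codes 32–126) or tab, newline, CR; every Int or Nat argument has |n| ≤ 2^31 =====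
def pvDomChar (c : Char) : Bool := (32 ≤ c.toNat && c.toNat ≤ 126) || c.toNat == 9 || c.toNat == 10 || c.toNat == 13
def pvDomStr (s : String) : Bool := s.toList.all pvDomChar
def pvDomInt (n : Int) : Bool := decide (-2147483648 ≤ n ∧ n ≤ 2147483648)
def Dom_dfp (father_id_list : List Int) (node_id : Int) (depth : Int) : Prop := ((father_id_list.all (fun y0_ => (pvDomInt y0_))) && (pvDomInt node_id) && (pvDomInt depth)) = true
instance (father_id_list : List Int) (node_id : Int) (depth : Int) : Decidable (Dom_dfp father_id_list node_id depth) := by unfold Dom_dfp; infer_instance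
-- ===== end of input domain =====

-- B replaces A's per-node rescan of the whole list by a children adjacency dict built once,
-- and threads the two result dicts through one DFS instead of merging per-call dicts.
-- ===== PORT A =====
def findChildren (father_id_list : List Int) (node_id : Int) : List Int :=
  (PySem.List.enumerate father_id_list).foldl
    (fun children_list p => if p.2 == node_id then children_list ++ [p.1] else children_list) []

-- A's recursion, fuel = father_id_list.length + 1 (enough whenever the Python terminates;
-- it recurses forever exactly on the inputs Pre_dfp excludes)
def dfpGo (father_id_list : List Int) : Nat → Int → Int →
    PySem.Dict Int (List Int) × PySem.Dict Int Int
  | 0, _, _ => (PySem.Dict.empty, PySem.Dict.empty)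
  | fuel+1, node_id, depth =>
    let children_list := findChildren father_id_list node_id
    children_list.foldl
      (fun acc child_node =>
        let r := dfpGo father_id_list fuel child_node (depth + 1)
        (acc.1.update r.1.items, acc.2.update r.2.items))
      (PySem.Dict.empty.insert node_id children_list, PySem.Dict.empty.insert node_id depth)

def dfp (father_id_list : List Int) (node_id : Int) (depth : Int) :
    (List (Int × List Int)) × (List (Int × Int)) :=
  let r := dfpGo father_id_list (father_id_list.length + 1) node_id depth
  (r.1.items, r.2.items)

-- ===== PORT B =====
-- children.setdefault(father, []).append(node) in one pass over enumerate(father_id_list)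
def buildChildren (father_id_list : List Int) : PySem.Dict Int (List Int) :=
  (PySem.List.enumerate father_id_list).foldl
    (fun children p => children.modify p.2 [] (fun l => l ++ [p.1])) PySem.Dict.empty

-- the inner `visit` recursion, threading the accumulator pair; same fuel discipline as dfpGo
def visitGo (children : PySem.Dict Int (List Int)) : Nat → Int → Int →
    PySem.Dict Int (List Int) × PySem.Dict Int Int →
    PySem.Dict Int (List Int) × PySem.Dict Int Int
  | 0, _, _, acc => acc
  | fuel+1, nid, d, acc =>
    let kids := children.getD nid []
    kids.foldl (fun a c => visitGo children fuel c (d + 1) a)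
      (acc.1.insert nid kids, acc.2.insert nid d)

def dfp_alt (father_id_list : List Int) (node_id : Int) (depth : Int) :
    (List (Int × List Int)) × (List (Int × Int)) :=
  let children := buildChildren father_id_list
  let r := visitGo children (father_id_list.length + 1) node_id depth
    (PySem.Dict.empty, PySem.Dict.empty)
  (r.1.items, r.2.items)

-- ===== PRECONDITION & SPEC =====
-- one step up the father chain (only indices 0..n-1 have a father entry)
def fatherStep (father_id_list : List Int) (i : Int) : Option Int :=
  if 0 ≤ i ∧ i < father_id_list.length then some (father_id_list.getD i.toNat 0) else none

def iterFather (father_id_list : List Int) : Nat → Int → Option Int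
  | 0, i => some i
  | k+1, i =>
    match fatherStep father_id_list i with
    | some j => iterFather father_id_list k j
    | none => none

-- Pre_ excludes exactly the inputs on which node_id lies on a father-cycle: there A's
-- recursion never returns (RecursionError); on every other input A returns normally.
def Pre_dfp (father_id_list : List Int) (node_id : Int) (depth : Int) : Prop :=
  ¬ ∃ k ∈ List.range father_id_list.length, iterFather father_id_list (k + 1) node_id = some node_id

instance (father_id_list : List Int) (node_id : Int) (depth : Int) :
    Decidable (Pre_dfp father_id_list node_id depth) := by unfold Pre_dfp; infer_instance

def pvWitness_dfp : List Int × Int × Int := ([-1, 0, 0], -1, -1)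

def Spec_dfp (father_id_list : List Int) (node_id : Int) (depth : Int)
    (out : (List (Int × List Int)) × (List (Int × Int))) : Prop :=
  out = dfp_alt father_id_list node_id depth
instance (father_id_list : List Int) (node_id : Int) (depth : Int)
    (out : (List (Int × List Int)) × (List (Int × Int))) :
    Decidable (Spec_dfp father_id_list node_id depth out) := by unfold Spec_dfp; infer_instance

-- ===== CLAIM (what is proved, stated in full; the proofs are below) =====
def Claim_equal_dfp : Prop := ∀ (father_id_list : List Int) (node_id : Int) (depth : Int),
  Dom_dfp father_id_list node_id depth → Pre_dfp father_id_list node_id depth →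
  Spec_dfp father_id_list node_id depth (dfp father_id_list node_id depth)

-- ===== LEMMAS AND PROOFS =====

theorem getD_buildChildren (fl : List Int) (nid : Int) :
    (buildChildren fl).getD nid [] = findChildren fl nid := by
  unfold buildChildren findChildren
  have h : (PySem.List.enumerate fl).foldl
        (fun children p => children.modify p.2 [] (fun l => l ++ [p.1])) PySem.Dict.empty
      = (((PySem.List.enumerate fl).map (fun p => (p.2, p.1))).foldl
        (fun children p => children.modify p.1 [] (fun l => l ++ [p.2])) PySem.Dict.empty) := by
    rw [List.foldl_map]
  rw [h, PySem.Dict.getD_foldl_modify_append, PySem.List.foldl_append_if]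
  simp [List.filter_map, List.map_map, Function.comp_def]


theorem insert_comm_of_contains {κ ν : Type} [BEq κ] [LawfulBEq κ]
    (e : PySem.Dict κ ν) (k k' : κ) (v w : ν) (hk : e.contains k = true) (hne : k ≠ k') :
    (e.insert k' w).insert k v = (e.insert k v).insert k' w := by
  apply PySem.Dict.ext
  have hk1 : (e.insert k' w).contains k = true := by
    rw [PySem.Dict.contains_insert]; simp [hk]
  by_cases hk' : e.contains k' = true
  · have hk'1 : (e.insert k v).contains k' = true := by
      rw [PySem.Dict.contains_insert]; simp [hk']
    rw [PySem.Dict.items_insert_of_contains _ _ hk1,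
        PySem.Dict.items_insert_of_contains _ _ hk',
        PySem.Dict.items_insert_of_contains _ _ hk'1,
        PySem.Dict.items_insert_of_contains _ _ hk]
    rw [List.map_map, List.map_map]
    apply List.map_congr_left
    intro p _
    simp only [Function.comp_def]
    by_cases h1 : p.1 == k'
    · have : ¬ (p.1 == k) = true := by
        intro h2; exact hne (by rw [← eq_of_beq h2, eq_of_beq h1])
      simp [h1, this, beq_iff_eq, Ne.symm hne]
    · by_cases h2 : p.1 == k <;> simp [h1, h2, beq_iff_eq, hne]
  · have hk'2 : (e.insert k v).contains k' = false := by
      rw [PySem.Dict.contains_insert]; simp [hk', beq_iff_eq, Ne.symm hne]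
    rw [PySem.Dict.items_insert_of_contains _ _ hk1,
        PySem.Dict.items_insert_of_not_contains _ _ (by simpa using hk'),
        PySem.Dict.items_insert_of_not_contains _ _ hk'2,
        PySem.Dict.items_insert_of_contains _ _ hk]
    rw [List.map_append]
    congr 1
    simp [beq_iff_eq, Ne.symm hne]

theorem dict_update_append {κ ν : Type} [BEq κ]
    (d : PySem.Dict κ ν) (l1 l2 : List (κ × ν)) :
    d.update (l1 ++ l2) = (d.update l1).update l2 := by
  show List.foldl _ d (l1 ++ l2) = _
  rw [List.foldl_append]
  rfl

theorem update_insert_of_contains {κ ν : Type} [BEq κ] [LawfulBEq κ]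
    (e : PySem.Dict κ ν) (s : List (κ × ν)) (k : κ) (v : ν)
    (hk : e.contains k = true) (hs : ∀ p ∈ s, p.1 ≠ k) :
    (e.update s).insert k v = (e.insert k v).update s := by
  induction s generalizing e with
  | nil => rfl
  | cons p t ih =>
    have hp : p.1 ≠ k := hs p (by simp)
    have hcont : (e.insert p.1 p.2).contains k = true := by
      rw [PySem.Dict.contains_insert]; simp [hk]
    show ((e.insert p.1 p.2).update t).insert k v = ((e.insert k v).insert p.1 p.2).update t
    rw [ih _ hcont (fun q hq => hs q (by simp [hq]))]
    rw [insert_comm_of_contains e k p.1 v p.2 hk (Ne.symm hp)]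

theorem update_items_insert {κ ν : Type} [BEq κ] [LawfulBEq κ]
    (a x : PySem.Dict κ ν) (k : κ) (v : ν) (hx : x.keys.Nodup) :
    a.update (x.insert k v).items = (a.update x.items).insert k v := by
  by_cases hc : x.contains k = true
  · have hmem : k ∈ x.items.map Prod.fst := (PySem.Dict.contains_iff_mem_keys x k).mp hc
    obtain ⟨p, hpmem, hpk⟩ := List.exists_of_mem_map hmem
    obtain ⟨l1, l2, hsplit⟩ := List.append_of_mem hpmem
    have hx' : (x.items.map Prod.fst).Nodup := hx
    rw [hsplit, List.map_append, List.map_cons, List.nodup_append] at hx'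
    have hkl1 : ∀ q ∈ l1, q.1 ≠ k := by
      intro q hq hEq
      have hd := hx'.2.2
      have hm2 : q.1 ∈ p.1 :: l2.map Prod.fst := by rw [hEq, hpk]; exact List.mem_cons_self
      exact hd q.1 (List.mem_map_of_mem hq) q.1 hm2 rfl
    have hkl2 : ∀ q ∈ l2, q.1 ≠ k := by
      intro q hq hEq
      have : p.1 ∉ l2.map Prod.fst := (List.nodup_cons.mp hx'.2.1).1
      exact this (hpk ▸ hEq ▸ List.mem_map_of_mem hq)
    have hfl1 : l1.map (fun q => if (q.1 == k) = true then (k, v) else q) = l1 := by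
      rw [List.map_congr_left (fun q hq => if_neg (by simp [hkl1 q hq]))]; simp
    have hfl2 : l2.map (fun q => if (q.1 == k) = true then (k, v) else q) = l2 := by
      rw [List.map_congr_left (fun q hq => if_neg (by simp [hkl2 q hq]))]; simp
    rw [PySem.Dict.items_insert_of_contains _ v hc, hsplit, List.map_append, List.map_cons,
        hfl1, hfl2, if_pos (by simp [hpk])]
    rw [dict_update_append, dict_update_append]
    show ((a.update l1).insert k v).update l2 = (((a.update l1).insert p.1 p.2).update l2).insert k v
    rw [update_insert_of_contains _ l2 k v (by rw [hpk]; exact PySem.Dict.contains_insert_self _ _ _) hkl2]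
    rw [hpk, PySem.Dict.insert_insert_self]
  · rw [PySem.Dict.items_insert_of_not_contains _ _ (by simpa using hc)]
    rw [dict_update_append]
    rfl

theorem update_items_update {κ ν : Type} [BEq κ] [LawfulBEq κ]
    (a x : PySem.Dict κ ν) (l : List (κ × ν)) (hx : x.keys.Nodup) :
    a.update ((x.update l).items) = (a.update x.items).update l := by
  induction l generalizing x with
  | nil => rfl
  | cons p t ih =>
    show a.update (((x.insert p.1 p.2).update t).items) = ((a.update x.items).insert p.1 p.2).update t
    rw [ih (x.insert p.1 p.2) (PySem.Dict.nodup_keys_insert _ _ _ hx)]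
    rw [update_items_insert _ _ _ _ hx]

theorem update_items_empty {κ ν : Type} [BEq κ] [LawfulBEq κ]
    (x : PySem.Dict κ ν) (hx : x.keys.Nodup) :
    PySem.Dict.empty.update x.items = x := by
  apply PySem.Dict.ext
  have h := PySem.Dict.items_foldl_insert_fresh x.items Prod.fst Prod.snd PySem.Dict.empty
    (fun a _ => PySem.Dict.contains_empty _) hx
  calc (PySem.Dict.empty.update x.items).items
      = (List.foldl (fun d (a : κ × ν) => d.insert a.1 a.2) PySem.Dict.empty x.items).items := rfl
    _ = PySem.Dict.empty.items ++ x.items.map (fun a => (a.1, a.2)) := h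
    _ = x.items := by
      show ([] : List (κ × ν)) ++ _ = _
      simp

-- accumulator-pair forms used by the main induction
def updPair (a r : PySem.Dict Int (List Int) × PySem.Dict Int Int) :
    PySem.Dict Int (List Int) × PySem.Dict Int Int :=
  (a.1.update r.1.items, a.2.update r.2.items)

def nodupPair (r : PySem.Dict Int (List Int) × PySem.Dict Int Int) : Prop :=
  r.1.keys.Nodup ∧ r.2.keys.Nodup

theorem nodupPair_updPair (a r : PySem.Dict Int (List Int) × PySem.Dict Int Int)
    (ha : nodupPair a) : nodupPair (updPair a r) :=
  ⟨PySem.Dict.nodup_keys_update _ _ ha.1, PySem.Dict.nodup_keys_update _ _ ha.2⟩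

theorem dfpGo_succ (fl : List Int) (f : Nat) (nid d : Int) :
    dfpGo fl (f + 1) nid d
      = (findChildren fl nid).foldl
          (fun acc c => updPair acc (dfpGo fl f c (d + 1)))
          (PySem.Dict.empty.insert nid (findChildren fl nid), PySem.Dict.empty.insert nid d) := rfl

theorem visitGo_succ (ch : PySem.Dict Int (List Int)) (f : Nat) (nid d : Int)
    (acc : PySem.Dict Int (List Int) × PySem.Dict Int Int) :
    visitGo ch (f + 1) nid d acc
      = (ch.getD nid []).foldl (fun a c => visitGo ch f c (d + 1) a)
          (acc.1.insert nid (ch.getD nid []), acc.2.insert nid d) := rfl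

theorem nodupPair_foldl (G : Int → PySem.Dict Int (List Int) × PySem.Dict Int Int)
    (l : List Int) (acc : PySem.Dict Int (List Int) × PySem.Dict Int Int)
    (ha : nodupPair acc) :
    nodupPair (l.foldl (fun acc c => updPair acc (G c)) acc) := by
  induction l generalizing acc with
  | nil => exact ha
  | cons c t ih => exact ih _ (nodupPair_updPair _ _ ha)

theorem nodupPair_dfpGo (fl : List Int) (f : Nat) (nid d : Int) :
    nodupPair (dfpGo fl f nid d) := by
  induction f generalizing nid d with
  | zero => exact ⟨PySem.Dict.nodup_keys_empty, PySem.Dict.nodup_keys_empty⟩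
  | succ f ih =>
    rw [dfpGo_succ]
    exact nodupPair_foldl _ _ _
      ⟨PySem.Dict.nodup_keys_insert _ _ _ PySem.Dict.nodup_keys_empty,
       PySem.Dict.nodup_keys_insert _ _ _ PySem.Dict.nodup_keys_empty⟩

theorem updPair_assoc (a x r : PySem.Dict Int (List Int) × PySem.Dict Int Int)
    (hx : nodupPair x) :
    updPair a (updPair x r) = updPair (updPair a x) r := by
  unfold updPair
  exact Prod.ext (update_items_update _ _ _ hx.1) (update_items_update _ _ _ hx.2)

theorem foldl_updPair (G : Int → PySem.Dict Int (List Int) × PySem.Dict Int Int)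
    (kids : List Int) (acc r0 : PySem.Dict Int (List Int) × PySem.Dict Int Int)
    (h0 : nodupPair r0) :
    updPair acc (kids.foldl (fun r c => updPair r (G c)) r0)
      = kids.foldl (fun a c => updPair a (G c)) (updPair acc r0) := by
  induction kids generalizing acc r0 with
  | nil => rfl
  | cons c t ih =>
    show updPair acc (t.foldl _ (updPair r0 (G c))) = t.foldl _ (updPair (updPair acc r0) (G c))
    rw [ih acc (updPair r0 (G c)) (nodupPair_updPair _ _ h0)]
    rw [updPair_assoc _ _ _ h0]

theorem visitGo_eq_updPair_dfpGo (fl : List Int) (f : Nat) :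
    ∀ (nid d : Int) (acc : PySem.Dict Int (List Int) × PySem.Dict Int Int),
    visitGo (buildChildren fl) f nid d acc = updPair acc (dfpGo fl f nid d) := by
  induction f with
  | zero =>
    intro nid d acc
    show acc = updPair acc (PySem.Dict.empty, PySem.Dict.empty)
    rfl
  | succ f ih =>
    intro nid d acc
    rw [visitGo_succ, dfpGo_succ, getD_buildChildren]
    have hfun : (fun (a : PySem.Dict Int (List Int) × PySem.Dict Int Int) (c : Int) =>
        visitGo (buildChildren fl) f c (d + 1) a)
        = fun a c => updPair a (dfpGo fl f c (d + 1)) := by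
      funext a c; exact ih c (d + 1) a
    rw [hfun]
    rw [foldl_updPair _ _ acc _
      ⟨PySem.Dict.nodup_keys_insert _ _ _ PySem.Dict.nodup_keys_empty,
       PySem.Dict.nodup_keys_insert _ _ _ PySem.Dict.nodup_keys_empty⟩]
    rfl

-- ===== VERDICT (by name: the statement is the Claim_ definition above) =====
theorem dfp_spec : Claim_equal_dfp := by
  intro fl nid d _ _
  show dfp fl nid d = dfp_alt fl nid d
  unfold dfp dfp_alt
  simp only [visitGo_eq_updPair_dfpGo fl (fl.length + 1) nid d]
  have hn := nodupPair_dfpGo fl (fl.length + 1) nid d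
  show ((dfpGo fl (fl.length + 1) nid d).1.items, (dfpGo fl (fl.length + 1) nid d).2.items)
    = ((updPair (PySem.Dict.empty, PySem.Dict.empty) (dfpGo fl (fl.length + 1) nid d)).1.items,
       (updPair (PySem.Dict.empty, PySem.Dict.empty) (dfpGo fl (fl.length + 1) nid d)).2.items)
  unfold updPair
  rw [update_items_empty _ hn.1, update_items_empty _ hn.2]
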